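-- pv_equiv track=rewrite | github.com/preenet/SETAR | src/feature/postag_transform.py | tag_emoj
-- ===== SOURCE A (Python) =====
-- def tag_emoj(tagged):
--     tag_list = []
--
--     for i in range(len(tagged)):
--         pl = [list(el) for el in tagged[i]]
--         tag_list.append(pl)
--
--     for item in tag_list:
--         for i, tag in enumerate(item):
--             for j, word in enumerate(tag):
--                 if "EMJ" in word:
--                     item[i][1] = "EMOJI"
--     return tag_list
-- ===== SOURCE B (Python) =====
-- def _tag_pair(w, t):
--     # A pair becomes [word, "EMOJI"] when either component contains "EMJ".
--     return [w, "EMOJI"] if ("EMJ" in w or "EMJ" in t) else [w, t]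
--
-- def _tag_item(item):
--     # Structural recursion over one sentence: head pair, then the tail.
--     if not item:
--         return []
--     w, t = item[0]
--     return [_tag_pair(w, t)] + _tag_item(item[1:])
--
-- def tag_emoj(tagged):
--     # Recursive decomposition instead of A's build-then-mutate index loops:
--     # process the head sentence, recurse on the tail; no mutation anywhere.
--     if not tagged:
--         return []
--     return [_tag_item(tagged[0])] + tag_emoj(tagged[1:])
-- ===== Notes on version B (the rewrite author's own statement) =====
-- stated objective: alternative
-- what changed: Replaces A's two staged passes (build a nested list copy with index loops, then relabel it by in-place item[i][1] mutation while re-reading the live list) with a pure structural recursion: two recursive helpers decompose the input head/tail and build each fully-labelled pair directly, with no intermediate structure and no mutation.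
import Mathlib
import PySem

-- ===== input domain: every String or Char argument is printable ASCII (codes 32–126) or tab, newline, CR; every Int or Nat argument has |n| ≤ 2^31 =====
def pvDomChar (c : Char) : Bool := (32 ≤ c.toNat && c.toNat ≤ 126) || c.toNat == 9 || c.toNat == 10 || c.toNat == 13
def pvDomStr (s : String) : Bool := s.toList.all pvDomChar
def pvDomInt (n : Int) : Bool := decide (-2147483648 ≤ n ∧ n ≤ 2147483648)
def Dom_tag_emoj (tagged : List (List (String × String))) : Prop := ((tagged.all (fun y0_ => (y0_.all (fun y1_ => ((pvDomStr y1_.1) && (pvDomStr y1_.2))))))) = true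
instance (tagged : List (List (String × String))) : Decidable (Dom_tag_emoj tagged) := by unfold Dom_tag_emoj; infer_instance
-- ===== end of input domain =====

-- B replaces A's build-then-mutate index loops with a pure head/tail structural
-- recursion building each fully-labelled pair directly; objective: alternative.

-- ===== PORT A =====

-- inner loop: 'for j, word in enumerate(tag): if "EMJ" in word: item[i][1] = "EMOJI"'
-- (tag is item[i], read live at each step as in Python; its length never changes)
def tagEmojInner (st : List (List String)) (i : Nat) : List (List String) :=
  (List.range (st.getD i []).length).foldl
    (fun st' j =>
      let tag := st'.getD i []
      let word := tag.getD j ""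
      if PySem.Str.isIn "EMJ" word then st'.set i (tag.set 1 "EMOJI") else st')
    st

-- 'for i, tag in enumerate(item): …' mutating item in place
def tagEmojItem (item : List (List String)) : List (List String) :=
  (List.range item.length).foldl tagEmojInner item

def tag_emoj (tagged : List (List (String × String))) : List (List (List String)) :=
  let tag_list :=
    (PySem.List.pyRange 0 (PySem.List.len tagged) 1).foldl
      (fun acc i =>
        acc ++ [((PySem.List.pyGetD tagged i ([] : List (String × String))).map
                  (fun el => [el.1, el.2]))])
      []
  tag_list.map tagEmojItem

-- ===== PORT B =====

-- '_tag_pair(w, t)'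
def tagPairB (w t : String) : List String :=
  if PySem.Str.isIn "EMJ" w || PySem.Str.isIn "EMJ" t then [w, "EMOJI"] else [w, t]

-- '_tag_item(item)': head pair, then recurse on the tail
def tagItemB : List (String × String) → List (List String)
  | [] => []
  | p :: rest => [tagPairB p.1 p.2] ++ tagItemB rest

-- 'tag_emoj(tagged)': head sentence, then recurse on the tail
def tag_emoj_alt : List (List (String × String)) → List (List (List String))
  | [] => []
  | item :: rest => [tagItemB item] ++ tag_emoj_alt rest

-- ===== PRECONDITION & SPEC =====
def Spec_tag_emoj (tagged : List (List (String × String))) (out : List (List (List String))) : Prop := out = tag_emoj_alt tagged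
instance (tagged : List (List (String × String))) (out : List (List (List String))) : Decidable (Spec_tag_emoj tagged out) := by unfold Spec_tag_emoj; infer_instance

-- ===== CLAIM (what is proved, stated in full; the proofs are below) =====
def Claim_equal_tag_emoj : Prop := ∀ (tagged : List (List (String × String))), Dom_tag_emoj tagged → Spec_tag_emoj tagged (tag_emoj tagged)

-- ===== LEMMAS AND PROOFS =====

-- reading / writing the element at position pre.length of pre ++ x :: l
theorem pv_getD_append (pre l : List (List String)) (x : List String) (d : List String) :
    (pre ++ x :: l).getD pre.length d = x := by
  induction pre with
  | nil => rfl
  | cons h t ih => simpa using ih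

theorem pv_set_append (pre l : List (List String)) (x y : List String) :
    (pre ++ x :: l).set pre.length y = pre ++ y :: l := by
  induction pre with
  | nil => rfl
  | cons h t ih => simpa using ih

-- the relabeled tag "EMOJI" does not itself contain "EMJ" (A re-tests it live)
theorem pv_isIn_emoji : PySem.Chars.isIn ['E','M','J'] ['E','M','O','J','I'] = false := by decide

-- the per-pair abbreviation for A's first pass
def pvG (p : String × String) : List String := [p.1, p.2]

-- one step of A's outer relabeling loop on the element at index pre.length
theorem pv_inner_step (pre l : List (List String)) (w t : String) :
    tagEmojInner (pre ++ [w, t] :: l) pre.length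
      = pre ++ (if PySem.Str.isIn "EMJ" w || PySem.Str.isIn "EMJ" t
                then [w, "EMOJI"] else [w, t]) :: l := by
  unfold tagEmojInner
  rw [pv_getD_append]
  show List.foldl _ _ [0, 1] = _
  by_cases hw : PySem.Chars.isIn ['E','M','J'] w.toList = true <;>
    by_cases ht : PySem.Chars.isIn ['E','M','J'] t.toList = true <;>
    simp [List.foldl, pv_getD_append, pv_set_append, pv_isIn_emoji, hw, ht]

-- A's relabeling loop over the unprocessed suffix rest, with processed prefix pre
theorem pv_item_aux (rest : List (String × String)) (pre : List (List String)) :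
    (List.range' pre.length rest.length).foldl tagEmojInner (pre ++ rest.map pvG)
      = pre ++ rest.map (fun p => tagPairB p.1 p.2) := by
  induction rest generalizing pre with
  | nil => simp
  | cons p rest ih =>
    rw [List.map_cons, List.length_cons, List.range'_succ, List.foldl_cons]
    have h1 : tagEmojInner (pre ++ pvG p :: rest.map pvG) pre.length
        = pre ++ tagPairB p.1 p.2 :: rest.map pvG := by
      simpa [pvG, tagPairB] using pv_inner_step pre (rest.map pvG) p.1 p.2
    rw [h1]
    have h2 := ih (pre ++ [tagPairB p.1 p.2])
    simpa using h2

-- A's whole per-item processing equals B's per-item recursion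
theorem pv_tagItemB_map (item : List (String × String)) :
    tagItemB item = item.map (fun p => tagPairB p.1 p.2) := by
  induction item with
  | nil => rfl
  | cons p rest ih => simp [tagItemB, ih]

theorem pv_item (item : List (String × String)) :
    tagEmojItem (item.map pvG) = tagItemB item := by
  have := pv_item_aux item []
  rw [pv_tagItemB_map]
  simpa [tagEmojItem, List.range_eq_range'] using this

-- B's recursion as a map
theorem pv_alt_map (tagged : List (List (String × String))) :
    tag_emoj_alt tagged = tagged.map tagItemB := by
  induction tagged with
  | nil => rfl
  | cons item rest ih => simp [tag_emoj_alt, ih]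

-- ===== VERDICT (by name: the statement is the Claim_ definition above) =====
theorem tag_emoj_spec : Claim_equal_tag_emoj := by
  intro tagged _
  simp only [Spec_tag_emoj, tag_emoj]
  rw [PySem.List.foldl_pyRange_zero_pyGetD tagged ([] : List (String × String))
        (fun acc item => acc ++ [item.map (fun el => [el.1, el.2])]) []]
  rw [PySem.List.foldl_append_singleton_eq_map, List.nil_append, List.map_map,
      pv_alt_map]
  apply List.map_congr_left
  intro item _
  exact pv_item item
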